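-- pv_equiv track=rewrite | github.com/zakharbalandin/programming_technologies | final.py | scores_result
-- ===== SOURCE A (Python) =====
-- def scores_result(list):
--     list_copy = list.copy()
--     list.sort()
--     list.reverse()
--     scores_result = []
--     for i in range(len(list)):
--         for j in range(len(list)):
--             if list_copy[i] == list[j]:
--                 scores_result.append(j)
--     return scores_result
-- ===== SOURCE B (Python) =====
-- def scores_result(list):
--     list_copy = list.copy()
--     list.sort(reverse=True)
--     result = []
--     for e in list_copy:
--         g = sum(1 for x in list_copy if x > e)
--         result.extend(range(g, g + list_copy.count(e)))
--     return result
-- ===== Notes on version B (the rewrite author's own statement) =====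
-- stated objective: alternative
-- what changed: B never searches the sorted array: it uses the identity that the indices of e in the descending-sorted list are the interval [#strictly-greater, #strictly-greater + #equal), emitting that range per element instead of scanning all positions for matches.
import Mathlib
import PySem

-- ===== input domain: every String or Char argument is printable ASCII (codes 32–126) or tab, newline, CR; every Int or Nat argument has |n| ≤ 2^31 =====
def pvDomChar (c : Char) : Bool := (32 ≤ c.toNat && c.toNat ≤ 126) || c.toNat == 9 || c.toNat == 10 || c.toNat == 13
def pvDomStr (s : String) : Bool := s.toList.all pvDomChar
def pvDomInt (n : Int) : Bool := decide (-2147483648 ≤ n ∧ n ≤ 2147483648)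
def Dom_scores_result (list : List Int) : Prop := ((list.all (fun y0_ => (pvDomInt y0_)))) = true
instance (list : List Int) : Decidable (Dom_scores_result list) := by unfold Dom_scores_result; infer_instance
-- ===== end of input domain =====

-- B emits, for each element, the index interval [#strictly-greater, #strictly-greater+#equal) instead of
-- scanning the descending-sorted array for matching positions. Both Pythons sort the argument descending
-- in place (same side effect); the equivalence proved here is about the return value.

-- ===== PORT A =====
def scores_result (list : List Int) : List Int :=
  let list_copy := list
  let s := (PySem.List.sorted list (fun x => x) false).reverse
  (PySem.List.pyRange 0 (s.length : Int) 1).foldl (fun acc i =>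
    (PySem.List.pyRange 0 (s.length : Int) 1).foldl (fun acc2 j =>
      if PySem.List.pyGetD list_copy i 0 = PySem.List.pyGetD s j 0 then acc2 ++ [j] else acc2) acc) []

-- ===== PORT B =====
def scores_result_alt (list : List Int) : List Int :=
  let list_copy := list
  list_copy.foldl (fun acc e =>
    let g : Int := (list_copy.countP (fun x => decide (e < x)) : Nat)
    acc ++ PySem.List.pyRange g (g + (list_copy.count e : Nat)) 1) []

-- ===== PRECONDITION & SPEC =====
def Spec_scores_result (list : List Int) (out : List Int) : Prop := out = scores_result_alt list
instance (list : List Int) (out : List Int) : Decidable (Spec_scores_result list out) := by unfold Spec_scores_result; infer_instance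

-- ===== CLAIM (what is proved, stated in full; the proofs are below) =====
def Claim_equal_scores_result : Prop := ∀ (list : List Int), Dom_scores_result list → Spec_scores_result list (scores_result list)

-- ===== LEMMAS AND PROOFS =====

theorem pv_map_succ_range' (g c : Nat) : (List.range' g c).map Nat.succ = List.range' (g+1) c := by
  calc (List.range' g c).map Nat.succ
      = (List.range' g c).map (fun x => 1 + x) := List.map_congr_left (fun k _ => by omega)
    _ = List.range' (1+g) c := List.map_add_range' ..
    _ = List.range' (g+1) c := by rw [Nat.add_comm]

-- In a descending-sorted list, the indices holding e form exactly the interval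
-- [countP (e < ·), countP (e < ·) + count e).
theorem pv_filter_range_sorted (s : List Int) (hs : s.Pairwise (fun a b => b ≤ a)) (e : Int) :
    (List.range s.length).filter (fun k => decide (e = s.getD k 0)) =
      List.range' (s.countP (fun x => decide (e < x))) (s.count e) := by
  induction s with
  | nil => simp
  | cons a t ih =>
    rcases List.pairwise_cons.mp hs with ⟨ha, ht⟩
    have IH := ih ht
    rw [List.length_cons, List.range_succ_eq_map, List.filter_cons, List.filter_map]
    have hcomp : ((fun k => decide (e = (a :: t).getD k 0)) ∘ Nat.succ)
        = (fun k => decide (e = t.getD k 0)) := by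
      funext k; simp
    rw [hcomp, IH, pv_map_succ_range']
    by_cases hea : e = a
    · subst hea
      have hg : t.countP (fun x => decide (e < x)) = 0 := by
        rw [List.countP_eq_zero]
        intro b hb; simpa using not_lt.mpr (ha b hb)
      simp only [List.getD_cons_zero, decide_true, if_true, hg, List.countP_cons,
        List.count_cons_self, lt_irrefl, decide_false, Bool.false_eq_true, if_false,
        Nat.add_zero, Nat.zero_add]
      rw [List.range'_succ]
    · have hcount : (a :: t).count e = t.count e := by
        simp [Ne.symm hea]
      have hhead : decide (e = (a :: t).getD 0 0) = false := by simp [hea]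
      rw [hhead]
      simp only [Bool.false_eq_true, if_false, hcount]
      by_cases hlt : e < a
      · have hcp : (a :: t).countP (fun x => decide (e < x))
            = t.countP (fun x => decide (e < x)) + 1 := by
          simp [hlt]
        rw [hcp]
      · have hae : a < e := lt_of_le_of_ne (not_lt.mp hlt) (Ne.symm hea)
        have hg : t.countP (fun x => decide (e < x)) = 0 := by
          rw [List.countP_eq_zero]
          intro b hb; simpa using not_lt.mpr (le_of_lt (lt_of_le_of_lt (ha b hb) hae))
        have hc0 : t.count e = 0 := by
          rw [List.count_eq_zero]
          intro hmem; exact absurd (ha e hmem) (not_le.mpr hae)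
        have hcp : (a :: t).countP (fun x => decide (e < x)) = 0 := by
          simp [hg, not_lt.mpr (le_of_lt hae)]
        rw [hc0, hg, hcp]
        simp

-- pyRange g (g+c) 1 of Nat casts is range' g c, cast elementwise
theorem pv_cast_range (g c : Nat) :
    PySem.List.pyRange (g : Int) ((g : Int) + (c : Int)) 1 = (List.range' g c).map Int.ofNat := by
  have h : ((g : Int) + (c : Int) - g).toNat = c := by omega
  rw [PySem.List.pyRange_one, h, List.range'_eq_map_range, List.map_map]
  refine List.map_congr_left fun k hk => ?_
  simp [Int.ofNat_eq_natCast]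

-- A's inner scan over the descending-sorted list s collects exactly the interval of e's positions
theorem pv_inner (s : List Int) (hs : s.Pairwise (fun a b => b ≤ a)) (e : Int) (acc : List Int) :
    (PySem.List.pyRange 0 (s.length : Int) 1).foldl
        (fun acc2 j => if e = PySem.List.pyGetD s j 0 then acc2 ++ [j] else acc2) acc
      = acc ++ (List.range' (s.countP (fun x => decide (e < x))) (s.count e)).map Int.ofNat := by
  rw [PySem.List.pyRange_one, List.foldl_map]
  simp only [Int.sub_zero, Int.toNat_natCast, Int.zero_add, PySem.List.pyGetD_natCast]
  rw [PySem.List.foldl_append_ite (fun k => e = s.getD k 0) (fun k => (↑k : Int))]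
  rw [pv_filter_range_sorted s hs e]
  simp [Int.ofNat_eq_natCast]

-- ===== VERDICT (by name: the statement is the Claim_ definition above) =====
theorem scores_result_spec : Claim_equal_scores_result := by
  intro list _
  unfold Spec_scores_result scores_result scores_result_alt
  simp only []
  have hperm : ((PySem.List.sorted list (fun x => x) false).reverse).Perm list :=
    (List.reverse_perm _).trans (PySem.List.sorted_perm ..)
  have hpair : ((PySem.List.sorted list (fun x => x) false).reverse).Pairwise (fun a b => b ≤ a) := by
    rw [List.pairwise_reverse]
    simpa using PySem.List.sorted_pairwise (xs := list) (key := fun x => x)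
  have hlen : (((PySem.List.sorted list (fun x => x) false).reverse).length : Int)
      = (list.length : Int) := by
    simp [PySem.List.length_sorted]
  rw [hlen, PySem.List.foldl_pyRange_zero_pyGetD' list 0
    (fun acc e => (PySem.List.pyRange 0 (list.length : Int) 1).foldl
      (fun acc2 j => if e = PySem.List.pyGetD ((PySem.List.sorted list (fun x => x) false).reverse) j 0
        then acc2 ++ [j] else acc2) acc) []]
  rw [← hlen]
  simp only [pv_inner _ hpair, pv_cast_range, hperm.countP_eq, hperm.count_eq]
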